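-- pv_equiv track=rewrite | github.com/mattkistner/CS-1301 | HW09.py | balancedStr
-- ===== SOURCE A (Python) =====
-- def balancedStr(charStr):
--     if charStr == "":
--         return True
--     else:
--         if charStr[0].isupper() and charStr[-1].isupper():
--             return balancedStr(charStr[1:-1])
--         elif charStr[0].islower() and charStr[-1].islower():
--             return balancedStr(charStr[1:-1])
--         elif len(charStr) == 1:
--             return True
--         else:
--             return False
--     pass
-- ===== SOURCE B (Python) =====
-- def balancedStr(charStr):
--     n = len(charStr)
--     for k in range(n // 2):
--         a, b = charStr[k], charStr[n - 1 - k]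
--         if not ((a.isupper() and b.isupper()) or (a.islower() and b.islower())):
--             return False
--     return True
-- ===== Notes on version B (the rewrite author's own statement) =====
-- stated objective: faster
-- what changed: Replaced the recursion that re-slices the string from both ends with a single indexed loop over the first n//2 symmetric pairs, comparing case directly.
import Mathlib
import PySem

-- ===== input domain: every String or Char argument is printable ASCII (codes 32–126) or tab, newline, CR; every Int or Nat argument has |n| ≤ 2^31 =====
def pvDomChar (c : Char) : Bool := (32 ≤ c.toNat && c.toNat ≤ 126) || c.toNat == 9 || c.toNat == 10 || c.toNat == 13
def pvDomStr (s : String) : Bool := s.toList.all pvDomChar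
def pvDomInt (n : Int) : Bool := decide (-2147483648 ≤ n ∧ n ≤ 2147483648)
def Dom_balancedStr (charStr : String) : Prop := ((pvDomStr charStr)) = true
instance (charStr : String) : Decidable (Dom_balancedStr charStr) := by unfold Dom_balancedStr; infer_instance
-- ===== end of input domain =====

-- B replaces A's recursion with end-to-end re-slicing by one indexed pass over the first n/2 symmetric index pairs.

-- ===== PORT A =====
-- recursion on the character list; charStr[1:-1] is rest.dropLast, charStr[-1] is getLast
def balancedStrRec : List Char → Bool
  | [] => true
  | c :: rest =>
    let lastC := (c :: rest).getLast (by simp)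
    if PySem.Chars.isupper c && PySem.Chars.isupper lastC then
      balancedStrRec rest.dropLast
    else if PySem.Chars.islower c && PySem.Chars.islower lastC then
      balancedStrRec rest.dropLast
    else if (c :: rest).length == 1 then true
    else false
termination_by l => l.length
decreasing_by
  all_goals simp [List.length_dropLast]

def balancedStr (charStr : String) : Bool := balancedStrRec charStr.toList

-- ===== PORT B =====
-- pairOK a b = (a.isupper() and b.isupper()) or (a.islower() and b.islower())
def pairOK (a b : Char) : Bool :=
  (PySem.Chars.isupper a && PySem.Chars.isupper b) ||
  (PySem.Chars.islower a && PySem.Chars.islower b)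

-- for k in range(n // 2): check charStr[k] against charStr[n-1-k] (indices in range; getD is total)
def balancedStrAltL (l : List Char) : Bool :=
  (List.range (l.length / 2)).all fun k =>
    pairOK (l.getD k ' ') (l.getD (l.length - 1 - k) ' ')

def balancedStr_alt (charStr : String) : Bool := balancedStrAltL charStr.toList

-- ===== PRECONDITION & SPEC =====
def Spec_balancedStr (charStr : String) (out : Bool) : Prop := out = balancedStr_alt charStr
instance (charStr : String) (out : Bool) : Decidable (Spec_balancedStr charStr out) := by unfold Spec_balancedStr; infer_instance

-- ===== CLAIM (what is proved, stated in full; the proofs are below) =====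
def Claim_equal_balancedStr : Prop := ∀ (charStr : String), Dom_balancedStr charStr → Spec_balancedStr charStr (balancedStr charStr)

-- ===== LEMMAS AND PROOFS =====

theorem recA_nil : balancedStrRec [] = true := by simp [balancedStrRec]

theorem recA_single (c : Char) : balancedStrRec [c] = true := by
  rw [balancedStrRec.eq_2]
  split_ifs <;> simp_all [recA_nil]

theorem recA_pair (c x : Char) (m : List Char) :
    balancedStrRec (c :: (m ++ [x])) = (pairOK c x && balancedStrRec m) := by
  have hlast : ∀ (h : m ++ [x] ≠ []), (m ++ [x]).getLast h = x := by
    intro h; exact List.getLast_concat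
  have hdrop : (m ++ [x]).dropLast = m := List.dropLast_concat
  conv_lhs => rw [balancedStrRec.eq_2]
  rw [List.getLast_cons (by simp : m ++ [x] ≠ []), hlast, hdrop]
  simp only [List.length_cons, pairOK]
  by_cases hu : (PySem.Chars.isupper c && PySem.Chars.isupper x) = true
  · simp [hu]
  · by_cases hl : (PySem.Chars.islower c && PySem.Chars.islower x) = true
    · simp [hu, hl]
    · simp [hu, hl]

theorem altL_nil : balancedStrAltL [] = true := by decide

theorem altL_single (c : Char) : balancedStrAltL [c] = true := by
  simp [balancedStrAltL]

theorem altL_pair (c x : Char) (m : List Char) :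
    balancedStrAltL (c :: (m ++ [x])) = (pairOK c x && balancedStrAltL m) := by
  have hlen : (c :: (m ++ [x])).length = m.length + 2 := by simp
  have hdiv : (m.length + 2) / 2 = m.length / 2 + 1 := by omega
  unfold balancedStrAltL
  rw [hlen, hdiv, List.range_succ_eq_map]
  simp only [List.all_cons, List.all_map]
  congr 1
  · have h1 : (c :: (m ++ [x])).getD 0 ' ' = c := rfl
    have h2 : (c :: (m ++ [x])).getD (m.length + 2 - 1 - 0) ' ' = x := by
      have h3 : m.length + 2 - 1 - 0 = m.length + 1 := by omega
      rw [h3]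
      show (m ++ [x]).getD m.length ' ' = x
      rw [List.getD_append_right _ _ _ _ (le_refl _)]
      simp
    rw [h1, h2]
  · have hpt : ∀ k, k < m.length / 2 →
        pairOK ((c :: (m ++ [x])).getD (k + 1) ' ')
          ((c :: (m ++ [x])).getD (m.length + 2 - 1 - (k + 1)) ' ')
        = pairOK (m.getD k ' ') (m.getD (m.length - 1 - k) ' ') := by
      intro k hkm
      have hk1 : k < m.length := by omega
      have hA : (c :: (m ++ [x])).getD (k + 1) ' ' = m.getD k ' ' := by
        show (m ++ [x]).getD k ' ' = m.getD k ' '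
        rw [List.getD_append _ _ _ _ hk1]
      have hsub : m.length + 2 - 1 - (k + 1) = (m.length - 1 - k) + 1 := by omega
      have hB : (c :: (m ++ [x])).getD (m.length + 2 - 1 - (k + 1)) ' ' =
          m.getD (m.length - 1 - k) ' ' := by
        rw [hsub]
        show (m ++ [x]).getD (m.length - 1 - k) ' ' = m.getD (m.length - 1 - k) ' '
        rw [List.getD_append _ _ _ _ (by omega)]
      rw [hA, hB]
    rw [Bool.eq_iff_iff]
    simp only [List.all_eq_true, List.mem_range, Function.comp]
    constructor
    · intro h k hk
      rw [← hpt k hk]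
      exact h k hk
    · intro h k hk
      rw [hpt k hk]
      exact h k hk

theorem main_eq : ∀ (n : Nat) (l : List Char), l.length ≤ n →
    balancedStrRec l = balancedStrAltL l := by
  intro n
  induction n with
  | zero =>
    intro l hl
    have : l = [] := List.eq_nil_of_length_eq_zero (by omega)
    subst this; rw [recA_nil, altL_nil]
  | succ n ih =>
    intro l hl
    match l with
    | [] => rw [recA_nil, altL_nil]
    | [c] => rw [recA_single, altL_single]
    | c :: rest =>
      rcases List.eq_nil_or_concat rest with h | ⟨m, x, hmx⟩
      · subst h; rw [recA_single, altL_single]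
      · subst hmx
        rw [List.concat_eq_append, recA_pair, altL_pair]
        have hm : m.length ≤ n := by
          simp [List.concat_eq_append] at hl; omega
        rw [ih m hm]

-- ===== VERDICT (by name: the statement is the Claim_ definition above) =====
theorem balancedStr_spec : Claim_equal_balancedStr := by
  intro charStr _
  unfold Spec_balancedStr balancedStr balancedStr_alt
  exact main_eq charStr.toList.length charStr.toList (le_refl _)
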